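-- pv_equiv track=rewrite | github.com/DoctorDalek1963/WhatsApp-Formatter | WhatsApp Formatter.py | tag_replace
-- ===== SOURCE A (Python) =====
-- def tag_replace(string, char, tag):  # Replace char with tags in string
--     """Replace selected format character with selected HTML tag."""
--     count = 0
--     list_message = list(string)
--
--     # Search through each char in list_message and replace odds with <tag> and evens with </tag>
--     for x, letter in enumerate(list_message):
--         if letter == char:
--             if count == 0:
--                 # Replace char 1 with <tag>
--                 list_message[x] = str(f"<{tag}>")
--                 count = 1
--             elif count == 1:
--                 # Replace char 2 with </tag>
--                 list_message[x] = str(f"</{tag}>")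
--                 count = 0
--
--     return "".join(list_message)
-- ===== SOURCE B (Python) =====
-- def tag_replace(string, char, tag):  # Replace char with tags in string
--     """Replace selected format character with selected HTML tag."""
--     if len(char) != 1:
--         # A compares char against single characters, so a non-single-char
--         # separator never matches and the string is returned unchanged.
--         return string
--     parts = string.split(char)
--     out = parts[0]
--     opening = True
--     for part in parts[1:]:
--         out += f"<{tag}>" if opening else f"</{tag}>"
--         out += part
--         opening = not opening
--     return out
-- ===== Notes on version B (the rewrite author's own statement) =====
-- stated objective: idiomatic
-- what changed: Replaces A's enumerate-and-mutate-a-char-list scan with split-on-the-separator and reassembly of the parts with alternating open/close tags (guarding non-single-character separators, which can never match in A).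
import Mathlib
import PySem

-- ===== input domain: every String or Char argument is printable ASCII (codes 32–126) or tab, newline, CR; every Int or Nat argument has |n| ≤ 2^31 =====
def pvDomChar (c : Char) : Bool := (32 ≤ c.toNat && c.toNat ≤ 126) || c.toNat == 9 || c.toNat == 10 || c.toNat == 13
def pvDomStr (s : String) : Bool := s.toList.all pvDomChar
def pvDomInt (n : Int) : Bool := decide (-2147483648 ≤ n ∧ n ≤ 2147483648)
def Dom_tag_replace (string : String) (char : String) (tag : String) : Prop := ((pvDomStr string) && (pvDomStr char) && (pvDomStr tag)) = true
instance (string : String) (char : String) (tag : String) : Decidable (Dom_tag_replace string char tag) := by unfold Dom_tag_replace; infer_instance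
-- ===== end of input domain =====

-- B splits the string on the separator and reassembles the parts with alternating open/close
-- tags, instead of A's enumerate-and-mutate scan over a list of characters.

-- f"<{tag}>" and f"</{tag}>" (the literal tag pieces both Pythons build)
def pvOpenTag (tag : String) : List Char := '<' :: (tag.toList ++ ['>'])
def pvCloseTag (tag : String) : List Char := '<' :: '/' :: (tag.toList ++ ['>'])

-- ===== PORT A =====
-- state = (count, pieces so far): each original char is its own piece, a matched char is
-- replaced by the tag piece; "".join(list_message) = flatten of the pieces at the end
def tag_replace (string : String) (char : String) (tag : String) : String :=
  String.ofList
    ((string.toList.foldl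
      (fun (st : Int × List (List Char)) letter =>
        if [letter] = char.toList then
          if st.1 = 0 then (1, st.2 ++ [pvOpenTag tag])
          else if st.1 = 1 then (0, st.2 ++ [pvCloseTag tag])
          else (st.1, st.2 ++ [[letter]])
        else (st.1, st.2 ++ [[letter]]))
      (0, [])).2.flatten)

-- ===== PORT B =====
-- if len(char) != 1: return string; else split on the separator and rebuild:
-- out = parts[0]; for part in parts[1:]: out += alternating tag; out += part
def tag_replace_alt (string : String) (char : String) (tag : String) : String :=
  match char.toList with
  | [c] =>
    String.ofList
      (((List.splitOn c string.toList).tail.foldl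
        (fun (st : Bool × List Char) part =>
          (!st.1, st.2 ++ (if st.1 then pvOpenTag tag else pvCloseTag tag) ++ part))
        (true, (List.splitOn c string.toList).headD [])).2)
  | _ => string

-- ===== PRECONDITION & SPEC =====
def Spec_tag_replace (string : String) (char : String) (tag : String) (out : String) : Prop := out = tag_replace_alt string char tag
instance (string : String) (char : String) (tag : String) (out : String) : Decidable (Spec_tag_replace string char tag out) := by unfold Spec_tag_replace; infer_instance

-- ===== CLAIM (what is proved, stated in full; the proofs are below) =====
def Claim_equal_tag_replace : Prop := ∀ (string : String) (char : String) (tag : String), Dom_tag_replace string char tag → Spec_tag_replace string char tag (tag_replace string char tag)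

-- ===== LEMMAS AND PROOFS =====

-- proof-only normal form of A's pass: one piece per input char, the alternation as a Bool
def repChunks (c : Char) (tag : String) : Bool → List Char → List (List Char)
  | _, [] => []
  | b, x :: xs =>
    if x = c then (if b then pvOpenTag tag else pvCloseTag tag) :: repChunks c tag (!b) xs
    else [x] :: repChunks c tag b xs

-- parity of A's count after consuming cs (true ↔ count = 0)
def parAfter (c : Char) : Bool → List Char → Bool
  | b, [] => b
  | b, x :: xs => parAfter c (if x = c then !b else b) xs

-- proof-only normal form of B's reassembly of the non-head parts
def joinAlt (tag : String) : Bool → List (List Char) → List Char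
  | _, [] => []
  | b, p :: ps => (if b then pvOpenTag tag else pvCloseTag tag) ++ p ++ joinAlt tag (!b) ps

theorem foldA_eq (c : Char) (tag : String) :
    ∀ (cs : List Char) (b : Bool) (acc : List (List Char)),
    cs.foldl (fun (st : Int × List (List Char)) letter =>
        if letter = c then
          if st.1 = 0 then (1, st.2 ++ [pvOpenTag tag])
          else if st.1 = 1 then (0, st.2 ++ [pvCloseTag tag])
          else (st.1, st.2 ++ [[letter]])
        else (st.1, st.2 ++ [[letter]]))
      ((if b then 0 else 1), acc)
    = ((if parAfter c b cs then 0 else 1), acc ++ repChunks c tag b cs)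
  | [], b, acc => by simp [parAfter, repChunks]
  | x :: xs, b, acc => by
    by_cases hx : x = c
    · subst hx
      cases b
      · simpa [parAfter, repChunks, List.append_assoc] using
          foldA_eq x tag xs true (acc ++ [pvCloseTag tag])
      · simpa [parAfter, repChunks, List.append_assoc] using
          foldA_eq x tag xs false (acc ++ [pvOpenTag tag])
    · simpa [hx, parAfter, repChunks, List.append_assoc] using
        foldA_eq c tag xs b (acc ++ [[x]])

theorem foldA_nomatch (tag : String) (L : List Char) (hc : ∀ x : Char, [x] ≠ L) :
    ∀ (cs : List Char) (k : Int) (acc : List (List Char)),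
    cs.foldl (fun (st : Int × List (List Char)) letter =>
        if [letter] = L then
          if st.1 = 0 then (1, st.2 ++ [pvOpenTag tag])
          else if st.1 = 1 then (0, st.2 ++ [pvCloseTag tag])
          else (st.1, st.2 ++ [[letter]])
        else (st.1, st.2 ++ [[letter]]))
      (k, acc)
    = (k, acc ++ cs.map (fun x => [x]))
  | [], k, acc => by simp
  | x :: xs, k, acc => by
    simpa [hc x, List.append_assoc] using foldA_nomatch tag L hc xs k (acc ++ [[x]])

theorem foldB_eq (tag : String) :
    ∀ (parts : List (List Char)) (b : Bool) (acc : List Char),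
    (parts.foldl (fun (st : Bool × List Char) part =>
        (!st.1, st.2 ++ (if st.1 then pvOpenTag tag else pvCloseTag tag) ++ part))
      (b, acc)).2
    = acc ++ joinAlt tag b parts
  | [], b, acc => by simp [joinAlt]
  | p :: ps, b, acc => by
    simp only [List.foldl_cons]
    rw [foldB_eq tag ps (!b) ((acc ++ if b = true then pvOpenTag tag else pvCloseTag tag) ++ p)]
    simp [joinAlt, List.append_assoc]

theorem split_join (c : Char) (tag : String) :
    ∀ (cs : List Char) (b : Bool),
    (List.splitOnP (· == c) cs).headD [] ++ joinAlt tag b (List.splitOnP (· == c) cs).tail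
      = (repChunks c tag b cs).flatten
  | [], b => by simp [List.splitOnP_nil, joinAlt, repChunks]
  | x :: xs, b => by
    rcases hsp : List.splitOnP (· == c) xs with _ | ⟨h, t⟩
    · exact absurd hsp (List.splitOnP_ne_nil _ _)
    · have ihb := split_join c tag xs b
      have ihnb := split_join c tag xs (!b)
      rw [hsp] at ihb ihnb
      simp only [List.headD_cons, List.tail_cons] at ihb ihnb
      by_cases hx : x = c
      · simp only [List.splitOnP_cons, hx, beq_self_eq_true, if_true, hsp, List.tail_cons,
          List.headD_cons, repChunks, List.flatten_cons, joinAlt]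
        rw [← ihnb]
        simp [List.append_assoc]
      · have hbx : (x == c) = false := by simp [hx]
        simp only [List.splitOnP_cons, hbx, Bool.false_eq_true, if_false, hsp,
          List.modifyHead_cons, List.headD_cons, List.tail_cons]
        rw [repChunks]
        simp only [hx, if_false, List.flatten_cons]
        simp [← ihb]

theorem flatten_map_singleton (l : List Char) : (l.map (fun x => [x])).flatten = l := by
  induction l with
  | nil => rfl
  | cons x xs ih => simp [ih]

theorem foldA_eq0 (c : Char) (tag : String) (cs : List Char) :
    cs.foldl (fun (st : Int × List (List Char)) letter =>
        if letter = c then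
          if st.1 = 0 then (1, st.2 ++ [pvOpenTag tag])
          else if st.1 = 1 then (0, st.2 ++ [pvCloseTag tag])
          else (st.1, st.2 ++ [[letter]])
        else (st.1, st.2 ++ [[letter]]))
      (0, [])
    = ((if parAfter c true cs then 0 else 1), repChunks c tag true cs) := by
  simpa using foldA_eq c tag cs true []

-- ===== VERDICT (by name: the statement is the Claim_ definition above) =====
theorem tag_replace_spec : Claim_equal_tag_replace := by
  intro string char tag _
  unfold Spec_tag_replace tag_replace tag_replace_alt
  rcases hc : char.toList with _ | ⟨c, _ | ⟨c2, rest⟩⟩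
  · -- char == "" : no letter equals char, the string is unchanged
    rw [foldA_nomatch tag [] (by simp) string.toList 0 []]
    simp [flatten_map_singleton, String.ofList_toList]
  · -- the single-character case
    have hcond : (fun (st : Int × List (List Char)) letter =>
        if [letter] = [c] then
          if st.1 = 0 then ((1 : Int), st.2 ++ [pvOpenTag tag])
          else if st.1 = 1 then (0, st.2 ++ [pvCloseTag tag])
          else (st.1, st.2 ++ [[letter]])
        else (st.1, st.2 ++ [[letter]]))
      = (fun (st : Int × List (List Char)) letter =>
        if letter = c then
          if st.1 = 0 then (1, st.2 ++ [pvOpenTag tag])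
          else if st.1 = 1 then (0, st.2 ++ [pvCloseTag tag])
          else (st.1, st.2 ++ [[letter]])
        else (st.1, st.2 ++ [[letter]])) := by
      funext st letter
      simp only [List.cons.injEq, and_true]
    rw [hcond, foldA_eq0 c tag string.toList]
    show String.ofList (repChunks c tag true string.toList).flatten =
      String.ofList
        (((List.splitOn c string.toList).tail.foldl
          (fun (st : Bool × List Char) part =>
            (!st.1, st.2 ++ (if st.1 then pvOpenTag tag else pvCloseTag tag) ++ part))
          (true, (List.splitOn c string.toList).headD [])).2)
    rw [foldB_eq tag (List.splitOn c string.toList).tail true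
      ((List.splitOn c string.toList).headD [])]
    rw [show List.splitOn c string.toList = List.splitOnP (· == c) string.toList from rfl]
    rw [split_join c tag string.toList true]
  · -- len(char) ≥ 2 : no letter equals char, the string is unchanged
    rw [foldA_nomatch tag (c :: c2 :: rest) (by intro x; simp) string.toList 0 []]
    simp [flatten_map_singleton, String.ofList_toList]
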